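-- pv_equiv track=rewrite | github.com/pypi-data/pypi-mirror-400 | packages/rom24-quickmud-python/rom24_quickmud_python-2.5.4-py3-none-any.whl/mud/account/account_service.py | is_valid_account_name
-- ===== SOURCE A (Python) =====
-- _RESERVED_NAMES = {
--     "all",
--     "auto",
--     "immortal",
--     "self",
--     "someone",
--     "something",
--     "the",
--     "you",
--     "loner",
--     "none",
-- }
--
-- def sanitize_account_name(username: str) -> str:
--     """Trim surrounding whitespace from a submitted account name."""
--
--     return username.strip()
--
-- def is_valid_account_name(username: str) -> bool:
--     """Return True when the candidate matches ROM's `check_parse_name`."""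
--
--     candidate = sanitize_account_name(username)
--     if not candidate:
--         return False
--
--     lowered = candidate.lower()
--     if lowered in _RESERVED_NAMES:
--         return False
--
--     capitalized = candidate.capitalize()
--     if capitalized != "Alander" and (capitalized.startswith("Alan") or capitalized.endswith("Alander")):
--         return False
--
--     if len(candidate) < 2 or len(candidate) > 12:
--         return False
--
--     f_ill = True
--     adjcaps = False
--     cleancaps = False
--     total_caps = 0
--     for char in candidate:
--         if not char.isalpha():
--             return False
--         if char.isupper():
--             if adjcaps:
--                 cleancaps = True
--             total_caps += 1
--             adjcaps = True
--         else:
--             adjcaps = False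
--         if char.lower() not in {"i", "l"}:
--             f_ill = False
--
--     if f_ill:
--         return False
--
--     if cleancaps or (total_caps > len(candidate) // 2 and len(candidate) < 3):
--         return False
--
--     return True
-- ===== SOURCE B (Python) =====
-- _RESERVED_NAMES = {
--     "all", "auto", "immortal", "self", "someone", "something",
--     "the", "you", "loner", "none",
-- }
--
--
-- def is_valid_account_name(username: str) -> bool:
--     candidate = username.strip()
--     if not candidate:
--         return False
--     lowered = candidate.lower()
--     if lowered in _RESERVED_NAMES:
--         return False
--     capitalized = candidate.capitalize()
--     if capitalized != "Alander" and (capitalized.startswith("Alan") or capitalized.endswith("Alander")):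
--         return False
--     if not 2 <= len(candidate) <= 12:
--         return False
--     if not candidate.isalpha():
--         return False
--     if set(lowered) <= {"i", "l"}:
--         return False
--     # The capitals rule reduces to: no two uppercase letters at adjacent positions.
--     # (A's extra "total_caps > len//2 and len < 3" clause can only fire on a
--     # 2-letter all-caps name, which already has adjacent capitals.)
--     caps = [i for i, c in enumerate(candidate) if c.isupper()]
--     return all(j - i >= 2 for i, j in zip(caps, caps[1:]))
-- ===== Notes on version B (the rewrite author's own statement) =====
-- stated objective: alternative
-- what changed: A's fused loop threading four mutable flags (f_ill, adjcaps, cleancaps, total_caps) is replaced by whole-string methods (str.isalpha, a set-subset test for the all-i/l rule) plus a list of uppercase positions whose consecutive gaps are checked; the capital-count clause of A, which can only fire on a two-letter all-caps name that already has adjacent capitals, is eliminated as redundant.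
import Mathlib
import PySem

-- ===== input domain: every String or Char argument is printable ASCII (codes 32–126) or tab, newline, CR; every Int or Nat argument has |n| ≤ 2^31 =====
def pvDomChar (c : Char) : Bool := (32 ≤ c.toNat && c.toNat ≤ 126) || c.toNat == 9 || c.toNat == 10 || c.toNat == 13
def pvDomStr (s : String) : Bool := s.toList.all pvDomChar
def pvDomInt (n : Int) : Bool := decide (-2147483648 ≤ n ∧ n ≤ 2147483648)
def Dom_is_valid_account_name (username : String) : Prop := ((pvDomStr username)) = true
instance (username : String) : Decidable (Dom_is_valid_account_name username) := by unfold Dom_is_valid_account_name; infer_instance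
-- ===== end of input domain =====

-- B replaces A's fused four-flag loop by whole-string methods, a set-subset test and an
-- uppercase-position gap check, dropping A's redundant total_caps clause; objective: alternative.

-- shared module constant (the Python module's _RESERVED_NAMES, used by both sources)
def reservedNames : List (List Char) :=
  ["all".toList, "auto".toList, "immortal".toList, "self".toList, "someone".toList,
   "something".toList, "the".toList, "you".toList, "loner".toList, "none".toList]

-- str.capitalize(): first char upper-cased, the rest lowered — exact on the ASCII domain
def pyCapitalize : List Char → List Char
  | [] => []
  | c :: rest => PySem.Chars.upperChar c :: PySem.Chars.lower rest

-- ===== PORT A =====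
def sanitize_account_name (username : String) : String := PySem.Str.strip username

-- A's for-loop: early `return False` on a non-alpha char is the `none` branch;
-- state (f_ill, adjcaps, cleancaps, total_caps) threaded exactly as in the Python.
def loopA : List Char → Bool → Bool → Bool → Nat → Option (Bool × Bool × Nat)
  | [], f_ill, _, cleancaps, total_caps => some (f_ill, cleancaps, total_caps)
  | ch :: rest, f_ill, adjcaps, cleancaps, total_caps =>
    if !PySem.Chars.isalpha ch then none
    else
      let cleancaps' := if PySem.Chars.isupper ch then (if adjcaps then true else cleancaps) else cleancaps
      let total_caps' := if PySem.Chars.isupper ch then total_caps + 1 else total_caps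
      let adjcaps' := PySem.Chars.isupper ch
      let f_ill' := if PySem.Chars.lowerChar ch ∈ ['i', 'l'] then f_ill else false
      loopA rest f_ill' adjcaps' cleancaps' total_caps'

def is_valid_account_name (username : String) : Bool :=
  let candidate := (sanitize_account_name username).toList
  if candidate.isEmpty then false else
  let lowered := PySem.Chars.lower candidate
  if reservedNames.contains lowered then false else
  let capitalized := pyCapitalize candidate
  if (!(capitalized == "Alander".toList)) &&
     (PySem.Chars.startswith capitalized "Alan".toList ||
      PySem.Chars.endswith capitalized "Alander".toList) then false else
  if candidate.length < 2 || 12 < candidate.length then false else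
  match loopA candidate true false false 0 with
  | none => false
  | some (f_ill, cleancaps, total_caps) =>
    if f_ill then false
    else if cleancaps || (decide (candidate.length / 2 < total_caps) && decide (candidate.length < 3))
      then false
    else true

-- ===== PORT B =====
def is_valid_account_name_alt (username : String) : Bool :=
  let candidate := (PySem.Str.strip username).toList
  if candidate.isEmpty then false else
  let lowered := PySem.Chars.lower candidate
  if reservedNames.contains lowered then false else
  let capitalized := pyCapitalize candidate
  if (!(capitalized == "Alander".toList)) &&
     (PySem.Chars.startswith capitalized "Alan".toList ||
      PySem.Chars.endswith capitalized "Alander".toList) then false else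
  if !(decide (2 ≤ candidate.length) && decide (candidate.length ≤ 12)) then false else
  if !(PySem.Chars.strIsalpha candidate) then false else
  if PySem.Set.issubset (PySem.Set.ofList lowered) (PySem.Set.ofList ['i', 'l']) then false else
  let caps := ((PySem.List.enumerate candidate).filter (fun p => PySem.Chars.isupper p.2)).map (·.1)
  (caps.zip (caps.drop 1)).all (fun p => decide (2 ≤ p.2 - p.1))

-- ===== PRECONDITION & SPEC =====
def Spec_is_valid_account_name (username : String) (out : Bool) : Prop := out = is_valid_account_name_alt username
instance (username : String) (out : Bool) : Decidable (Spec_is_valid_account_name username out) := by unfold Spec_is_valid_account_name; infer_instance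

-- ===== CLAIM =====
def Claim_equal_is_valid_account_name : Prop := ∀ (username : String), Dom_is_valid_account_name username → Spec_is_valid_account_name username (is_valid_account_name username)

-- ===== LEMMAS AND PROOFS =====

-- proof-only helper: the adjacent-capitals scan with an explicit carry
def adjAny : Bool → List Char → Bool
  | _, [] => false
  | a, c :: rest => (a && PySem.Chars.isupper c) || adjAny (PySem.Chars.isupper c) rest

-- proof-only helper: indices (from k) of the uppercase characters
def capsIdx : Int → List Char → List Int
  | _, [] => []
  | k, c :: rest => if PySem.Chars.isupper c then k :: capsIdx (k + 1) rest else capsIdx (k + 1) rest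

def chkGaps (l : List Int) : Bool := (l.zip (l.drop 1)).all (fun p => decide (2 ≤ p.2 - p.1))

def optCons : Option Int → List Int → List Int
  | none, l => l
  | some p, l => p :: l

theorem loopA_eq (cs : List Char) (f a c : Bool) (t : Nat) :
    loopA cs f a c t =
      if cs.all PySem.Chars.isalpha then
        some (f && cs.all (fun ch => PySem.Chars.lowerChar ch ∈ ['i', 'l']),
              c || adjAny a cs,
              t + (cs.filter PySem.Chars.isupper).length)
      else none := by
  induction cs generalizing f a c t with
  | nil => simp [loopA, adjAny]
  | cons ch rest ih =>
    by_cases hα : PySem.Chars.isalpha ch = true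
    · simp only [loopA]
      rw [if_neg (by simp [hα]), ih]
      by_cases hu : PySem.Chars.isupper ch = true <;>
        by_cases ha : a = true <;> by_cases hc : c = true <;>
          by_cases hil : PySem.Chars.lowerChar ch = 'i' ∨ PySem.Chars.lowerChar ch = 'l'
      all_goals first
        | (rcases hil with h | h <;> simp_all [adjAny, Nat.add_comm, Nat.add_left_comm])
        | simp_all [adjAny, Nat.add_comm, Nat.add_left_comm]
    · simp [loopA, hα]

theorem capsIdx_eq (cs : List Char) (k : Int) :
    ((PySem.List.enumerate cs k).filter (fun p => PySem.Chars.isupper p.2)).map (·.1) =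
      capsIdx k cs := by
  induction cs generalizing k with
  | nil => simp [capsIdx, PySem.List.enumerate_nil]
  | cons c rest ih =>
    by_cases hu : PySem.Chars.isupper c = true <;>
      simp [PySem.List.enumerate_cons, capsIdx, hu, ih]

theorem chkGaps_eq_adjAny (cs : List Char) (k : Int) (a : Bool) (prev : Option Int)
    (hinv : (a = true ∧ prev = some (k - 1)) ∨
            (a = false ∧ (prev = none ∨ ∃ p, prev = some p ∧ p + 2 ≤ k))) :
    chkGaps (optCons prev (capsIdx k cs)) = ! adjAny a cs := by
  induction cs generalizing k a prev with
  | nil =>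
    rcases prev with _ | p <;> simp [capsIdx, optCons, chkGaps, adjAny]
  | cons c rest ih =>
    by_cases hu : PySem.Chars.isupper c = true
    · simp only [capsIdx, hu, if_pos, adjAny, Bool.not_or]
      rcases hinv with ⟨ha, hp⟩ | ⟨ha, hp⟩
      · subst ha hp
        have : chkGaps ((k - 1) :: k :: capsIdx (k + 1) rest) = false := by
          simp [chkGaps]
        simp [optCons, this]
      · subst ha
        have hrec := ih (k + 1) true (some k) (Or.inl ⟨rfl, by rw [Int.add_sub_cancel]⟩)
        rcases hp with hp | ⟨p, hp, hpk⟩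
        · subst hp
          simpa [optCons, chkGaps, adjAny, hu] using hrec
        · subst hp
          have : chkGaps (p :: k :: capsIdx (k + 1) rest) =
              (decide (2 ≤ k - p) && chkGaps (k :: capsIdx (k + 1) rest)) := by
            simp [chkGaps, List.zip]
          simp only [optCons] at hrec ⊢
          simp [this, hrec, show (2:Int) ≤ k - p by omega]
    · have hu' : PySem.Chars.isupper c = false := eq_false_of_ne_true hu
      simp only [capsIdx, hu', if_neg, Bool.false_eq_true, not_false_iff, adjAny]
      have hinv' : ((false : Bool) = true ∧ prev = some (k + 1 - 1)) ∨
          ((false : Bool) = false ∧ (prev = none ∨ ∃ p, prev = some p ∧ p + 2 ≤ k + 1)) := by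
        rcases hinv with ⟨_, hp⟩ | ⟨_, hp⟩
        · exact Or.inr ⟨rfl, Or.inr ⟨k - 1, hp, by omega⟩⟩

        · rcases hp with hp | ⟨p, hp, hpk⟩
          · exact Or.inr ⟨rfl, Or.inl hp⟩
          · exact Or.inr ⟨rfl, Or.inr ⟨p, hp, by omega⟩⟩
      have := ih (k + 1) false prev hinv'
      simpa [hu', adjAny] using this

theorem all_ofList {p : Char → Bool} (l : List Char) :
    (PySem.Set.ofList l).all p = l.all p := by
  rcases h : (PySem.Set.ofList l).all p with _ | _ <;>
  rcases h' : l.all p with _ | _ <;> try rfl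
  · exfalso
    rw [List.all_eq_true] at h'
    rw [Bool.eq_false_iff, ne_eq, List.all_eq_true] at h
    exact h (fun x hx => h' x ((PySem.Set.mem_ofList l x).mp hx))
  · exfalso
    rw [List.all_eq_true] at h
    rw [Bool.eq_false_iff, ne_eq, List.all_eq_true] at h'
    exact h' (fun x hx => h x ((PySem.Set.mem_ofList l x).mpr hx))

theorem issubset_il (cs : List Char) :
    PySem.Set.issubset (PySem.Set.ofList (PySem.Chars.lower cs)) (PySem.Set.ofList ['i', 'l']) =
      cs.all (fun ch => PySem.Chars.lowerChar ch ∈ ['i', 'l']) := by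
  have h2 : PySem.Set.ofList ['i', 'l'] = ['i', 'l'] := by decide
  show (PySem.Set.ofList (PySem.Chars.lower cs)).all
      (fun x => PySem.Set.contains (PySem.Set.ofList ['i', 'l']) x) = _
  rw [h2, all_ofList]
  simp only [PySem.Chars.lower, List.all_map]
  congr 1
  funext ch
  show List.contains ['i', 'l'] (PySem.Chars.lowerChar ch) = _
  simp [List.contains_eq_mem]

theorem is_valid_account_name_eq (username : String) :
    is_valid_account_name username = is_valid_account_name_alt username := by
  unfold is_valid_account_name is_valid_account_name_alt sanitize_account_name
  set cs := (PySem.Str.strip username).toList with hcs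
  by_cases h0 : cs.isEmpty = true
  · rw [if_pos h0, if_pos h0]
  · rw [if_neg h0, if_neg h0]
    by_cases h1 : reservedNames.contains (PySem.Chars.lower cs) = true
    · rw [if_pos h1, if_pos h1]
    · rw [if_neg h1, if_neg h1]
      by_cases h2 : ((!(pyCapitalize cs == "Alander".toList)) &&
          (PySem.Chars.startswith (pyCapitalize cs) "Alan".toList ||
           PySem.Chars.endswith (pyCapitalize cs) "Alander".toList)) = true
      · rw [if_pos h2, if_pos h2]
      · rw [if_neg h2, if_neg h2]
        have hlen : (decide (cs.length < 2) || decide (12 < cs.length)) =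
            (!(decide (2 ≤ cs.length) && decide (cs.length ≤ 12))) := by
          by_cases ha : cs.length < 2 <;> by_cases hb : 12 < cs.length <;>
            simp [ha, hb] <;> omega
        rw [← hlen]
        by_cases h3 : (decide (cs.length < 2) || decide (12 < cs.length)) = true
        · rw [if_pos h3, if_pos h3]
        · rw [if_neg h3, if_neg h3, loopA_eq]
          have hnil : cs ≠ [] := by simpa [List.isEmpty_iff] using h0
          by_cases h4 : cs.all PySem.Chars.isalpha = true
          · rw [if_pos h4,
              if_neg (by simp [PySem.Chars.strIsalpha, h4, hnil])]
            dsimp only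
            simp only [Bool.true_and, Bool.false_or, Nat.zero_add]
            rw [issubset_il]
            by_cases h5 : cs.all (fun ch => PySem.Chars.lowerChar ch ∈ ['i', 'l']) = true
            · rw [if_pos h5, if_pos h5]
            · rw [if_neg h5, if_neg h5]
              have hcaps : ((PySem.List.enumerate cs).filter
                    (fun p => PySem.Chars.isupper p.2)).map (·.1) = capsIdx 0 cs :=
                capsIdx_eq cs 0
              have hgaps : chkGaps (capsIdx 0 cs) = ! adjAny false cs := by
                simpa [optCons] using
                  chkGaps_eq_adjAny cs 0 false none (Or.inr ⟨rfl, Or.inl rfl⟩)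
              by_cases h6 : adjAny false cs = true
              · rw [if_pos (by simp [h6])]
                show false = chkGaps _
                rw [hcaps, hgaps, h6]; rfl
              · have h6' : adjAny false cs = false := eq_false_of_ne_true h6
                have htot : (decide (cs.length / 2 < (cs.filter PySem.Chars.isupper).length)
                    && decide (cs.length < 3)) = false := by
                  by_cases hl3 : cs.length < 3
                  · have hl2 : cs.length = 2 := by
                      simp only [Bool.or_eq_true, decide_eq_true_eq, not_or] at h3
                      omega
                    obtain ⟨x, y, hxy⟩ := List.length_eq_two.mp hl2
                    rw [hxy] at h6' ⊢
                    simp only [adjAny, Bool.false_and, Bool.false_or, Bool.or_false] at h6'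
                    by_cases hx : PySem.Chars.isupper x = true <;>
                      by_cases hy : PySem.Chars.isupper y = true <;>
                        simp_all [List.filter]
                  · simp [hl3]
                rw [htot]
                simp only [Bool.or_false, h6', if_neg Bool.false_ne_true]
                show true = chkGaps _
                rw [hcaps, hgaps, h6']; rfl
          · rw [if_neg h4, if_pos (by simp [PySem.Chars.strIsalpha, h4])]

-- ===== VERDICT =====
theorem is_valid_account_name_spec : Claim_equal_is_valid_account_name := by
  intro username _
  unfold Spec_is_valid_account_name
  exact is_valid_account_name_eq username
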